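-- pv_equiv track=rewrite | github.com/holbizmetrics/primes-research | factoring_groebner.py | compute_ones_from_pp
-- ===== SOURCE A (Python) =====
-- def compute_ones_from_pp(p, q, bits):
--     ones = []
--     for k in range(2 * bits - 1):
--         count = 0
--         for i in range(bits):
--             j = k - i
--             if 0 <= j < bits:
--                 count += ((p >> i) & 1) * ((q >> j) & 1)
--         ones.append(count)
--     return ones
-- ===== SOURCE B (Python) =====
-- def compute_ones_from_pp(p, q, bits):
--     # Sparse scatter: walk only the set bits of p and q and bump the i+j cell.
--     pis = [i for i in range(bits) if (p >> i) & 1]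
--     qis = [j for j in range(bits) if (q >> j) & 1]
--     ones = [0] * (2 * bits - 1)
--     for i in pis:
--         for j in qis:
--             ones[i + j] += 1
--     return ones
-- ===== Notes on version B (the rewrite author's own statement) =====
-- stated objective: faster
-- what changed: A gathers: for every output index k it scans all i in range(bits) and sums bit(p,i)*bit(q,k-i) (O(bits^2)); B scatters: it extracts the set-bit index lists of p and q once and increments ones[i+j] only for each pair of set bits, so zero bits cost nothing.
import Mathlib
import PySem

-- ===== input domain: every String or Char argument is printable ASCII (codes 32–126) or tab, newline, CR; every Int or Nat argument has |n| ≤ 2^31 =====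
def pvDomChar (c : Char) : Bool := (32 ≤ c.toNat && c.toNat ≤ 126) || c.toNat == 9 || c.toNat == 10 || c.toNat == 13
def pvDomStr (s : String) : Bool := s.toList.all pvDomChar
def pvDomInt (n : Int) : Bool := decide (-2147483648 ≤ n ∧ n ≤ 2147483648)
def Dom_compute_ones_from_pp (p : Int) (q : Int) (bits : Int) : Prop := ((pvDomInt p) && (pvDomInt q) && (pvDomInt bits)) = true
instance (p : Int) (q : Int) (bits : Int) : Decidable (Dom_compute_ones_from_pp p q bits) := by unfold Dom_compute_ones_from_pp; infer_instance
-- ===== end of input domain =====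

-- B replaces A's dense O(bits^2) gather (inner scan over all i for every k) by a sparse
-- scatter over the set-bit index lists of p and q; objective: alternative/faster on sparse inputs.


-- shared primitive: Python's `(x >> i) & 1`; `& 1` is exactly `% 2` (nonneg remainder) on ints,
-- and `>>>` is Python's arithmetic right shift (floors, also on negatives).
def pvBit (x : Int) (i : Nat) : Int := PySem.Int.mod (x >>> i) 2

-- ===== PORT A =====
def compute_ones_from_pp (p : Int) (q : Int) (bits : Int) : List Int :=
  (PySem.List.pyRange 0 (2 * bits - 1) 1).foldl (fun ones k =>
    ones ++ [(PySem.List.pyRange 0 bits 1).foldl (fun count i =>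
      let j := k - i
      if 0 ≤ j ∧ j < bits then count + pvBit p i.toNat * pvBit q j.toNat else count) 0]) []

-- ===== PORT B =====
-- `ones[i+j] += 1`: indices are provably in range, so the total pyGetD/pySetD forms are exact.
def compute_ones_from_pp_alt (p : Int) (q : Int) (bits : Int) : List Int :=
  let pis := (PySem.List.pyRange 0 bits 1).filter (fun i => pvBit p i.toNat != 0)
  let qis := (PySem.List.pyRange 0 bits 1).filter (fun j => pvBit q j.toNat != 0)
  let ones := List.replicate (2 * bits - 1).toNat (0 : Int)
  pis.foldl (fun o i => qis.foldl (fun o j =>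
    PySem.List.pySetD o (i + j) (PySem.List.pyGetD o (i + j) 0 + 1)) o) ones

-- ===== PRECONDITION & SPEC =====
def Spec_compute_ones_from_pp (p : Int) (q : Int) (bits : Int) (out : List Int) : Prop := out = compute_ones_from_pp_alt p q bits
instance (p : Int) (q : Int) (bits : Int) (out : List Int) : Decidable (Spec_compute_ones_from_pp p q bits out) := by unfold Spec_compute_ones_from_pp; infer_instance

-- ===== CLAIM (what is proved, stated in full; the proofs are below) =====
def Claim_equal_compute_ones_from_pp : Prop := ∀ (p : Int) (q : Int) (bits : Int), Dom_compute_ones_from_pp p q bits → Spec_compute_ones_from_pp p q bits (compute_ones_from_pp p q bits)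

-- ===== LEMMAS AND PROOFS =====

theorem pvBit_cases (x : Int) (n : Nat) : pvBit x n = 0 ∨ pvBit x n = 1 := by
  unfold pvBit
  rw [PySem.Int.mod_eq_emod_of_pos (by norm_num)]
  omega

-- the single cell update B performs
def pvBump (o : List Int) (n : Int) : List Int :=
  PySem.List.pySetD o n (PySem.List.pyGetD o n 0 + 1)

theorem pvBump_length (o : List Int) (n : Int) : (pvBump o n).length = o.length := by
  simp [pvBump]

theorem pvBump_getD (o : List Int) (n : Int) (hn : 0 ≤ n) (hlt : n < (o.length : Int))
    (k : Nat) : (pvBump o n).getD k 0 = o.getD k 0 + (if (k : Int) = n then 1 else 0) := by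
  unfold pvBump
  rw [PySem.List.pySetD_of_nonneg _ _ hn]
  have hrange : n.toNat < o.length := by omega
  rcases (by omega : (k : Int) = n ∨ (k : Int) ≠ n) with h | h
  · have hk : k = n.toNat := by omega
    subst hk
    simp [List.getD, PySem.List.pyGetD_of_nonneg _ _ hn, h, hrange]
  · have hk : n.toNat ≠ k := by omega
    simp [List.getD, h, hk]

-- scatter over a list of in-range indices counts occurrences
theorem pvScatter_spec (ns : List Int) : ∀ (L : List Int),
    (∀ n ∈ ns, 0 ≤ n ∧ n < (L.length : Int)) →
    (ns.foldl pvBump L).length = L.length ∧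
      ∀ k : Nat, (ns.foldl pvBump L).getD k 0 = L.getD k 0 + ns.count (k : Int) := by
  induction ns with
  | nil => intro L _; simp
  | cons n ns ih =>
    intro L hmem
    have hn := hmem n (by simp)
    have hlen : (pvBump L n).length = L.length := pvBump_length L n
    have ih' := ih (pvBump L n) (by
      intro m hm
      have := hmem m (by simp [hm])
      omega)
    refine ⟨by simpa [hlen] using ih'.1, ?_⟩
    intro k
    rw [List.foldl_cons, ih'.2 k, pvBump_getD L n hn.1 hn.2 k, List.count_cons]
    rcases (by omega : (k : Int) = n ∨ (k : Int) ≠ n) with h | h <;> (simp [h]; omega)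

-- B's nested loops are a scatter over the flattened index-sum list
theorem pvFlatten (pis qis : List Int) : ∀ (L : List Int),
    pis.foldl (fun o i => qis.foldl (fun o j => pvBump o (i + j)) o) L
      = (pis.flatMap (fun i => qis.map (fun j => i + j))).foldl pvBump L := by
  induction pis with
  | nil => intro L; simp
  | cons i pis ih =>
    intro L
    simp only [List.foldl_cons, List.flatMap_cons, List.foldl_append, ih]
    rw [List.foldl_map]

theorem pvFoldl_append_map (f : Int → Int) (l : List Int) : ∀ (init : List Int),
    l.foldl (fun a k => a ++ [f k]) init = init ++ l.map f := by
  induction l with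
  | nil => simp
  | cons x l ih => intro init; simp [ih]

theorem pvFoldl_ite_add (P : Int → Prop) [DecidablePred P] (g : Int → Int) (l : List Int) :
    ∀ (init : Int), l.foldl (fun c i => if P i then c + g i else c) init
      = init + (l.map (fun i => if P i then g i else 0)).sum := by
  induction l with
  | nil => simp
  | cons x l ih =>
    intro init
    by_cases h : P x <;> simp [h, ih, add_assoc]

theorem pvSum_filter (P : Int → Bool) (f : Int → Int) (l : List Int) :
    ((l.filter P).map f).sum = (l.map (fun i => if P i then f i else 0)).sum := by
  induction l with
  | nil => simp
  | cons x l ih =>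
    by_cases h : P x <;> simp [h, ih]

theorem pvCount_flatMap (a : Int) (f : Int → List Int) (l : List Int) :
    (l.flatMap f).count a = (l.map (fun i => (f i).count a)).sum := by
  induction l with
  | nil => simp
  | cons x l ih => simp [List.flatMap_cons, List.count_append, ih]

-- count in a nodup list is a membership indicator
theorem pvCount_nodup (l : List Int) (hl : l.Nodup) (x : Int) :
    l.count x = if x ∈ l then 1 else 0 := by
  by_cases h : x ∈ l
  · simp [h, List.count_eq_one_of_mem hl h]
  · simp [h, List.count_eq_zero_of_not_mem h]

-- A's inner gather at index k equals the multiplicity of k in B's flattened index-sum list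
theorem pvKey (p q bits k : Int) :
    (PySem.List.pyRange 0 bits 1).foldl (fun count i =>
        let j := k - i
        if 0 ≤ j ∧ j < bits then count + pvBit p i.toNat * pvBit q j.toNat else count) 0
      = (((((PySem.List.pyRange 0 bits 1).filter (fun i => pvBit p i.toNat != 0)).flatMap
          (fun i => ((PySem.List.pyRange 0 bits 1).filter (fun j => pvBit q j.toNat != 0)).map
            (fun j => i + j))).count k : Nat) : Int) := by
  have hqnodup : ((PySem.List.pyRange 0 bits 1).filter (fun j => pvBit q j.toNat != 0)).Nodup :=
    (PySem.List.nodup_pyRange_one 0 bits).filter _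
  show (PySem.List.pyRange 0 bits 1).foldl (fun count i =>
      if 0 ≤ k - i ∧ k - i < bits then count + pvBit p i.toNat * pvBit q (k - i).toNat else count) 0 = _
  rw [pvFoldl_ite_add (fun i => 0 ≤ k - i ∧ k - i < bits)
        (fun i => pvBit p i.toNat * pvBit q (k - i).toNat), zero_add,
      pvCount_flatMap, Nat.cast_list_sum, List.map_map, pvSum_filter]
  refine congrArg List.sum (List.map_congr_left ?_)
  intro i hi
  have hib := PySem.List.mem_pyRange_one.mp hi
  have hcnt : ∀ x : Int,
      (((PySem.List.pyRange 0 bits 1).filter (fun j => pvBit q j.toNat != 0)).map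
        (fun j => i + j)).count (i + x)
        = if (0 ≤ x ∧ x < bits) ∧ pvBit q x.toNat ≠ 0 then 1 else 0 := by
    intro x
    rw [List.count_map_of_injective _ _ (fun a b h => by omega), pvCount_nodup _ hqnodup]
    simp [List.mem_filter, PySem.List.mem_pyRange_one]
  have h1 : (((PySem.List.pyRange 0 bits 1).filter (fun j => pvBit q j.toNat != 0)).map
      (fun j => i + j)).count k
      = if (0 ≤ k - i ∧ k - i < bits) ∧ pvBit q (k - i).toNat ≠ 0 then 1 else 0 := by
    have := hcnt (k - i)
    simpa [show i + (k - i) = k from by omega] using this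
  simp only [Function.comp_apply, h1]
  rcases pvBit_cases p i.toNat with hp | hp <;>
    rcases pvBit_cases q (k - i).toNat with hq | hq <;>
      by_cases hb : 0 ≤ k - i ∧ k - i < bits <;>
        simp [hp, hq, hb]

-- ===== VERDICT (by name: the statement is the Claim_ definition above) =====
theorem compute_ones_from_pp_spec : Claim_equal_compute_ones_from_pp := by
  intro p q bits _
  unfold Spec_compute_ones_from_pp
  have hA : compute_ones_from_pp p q bits
      = (PySem.List.pyRange 0 (2 * bits - 1) 1).map (fun k =>
          (PySem.List.pyRange 0 bits 1).foldl (fun count i =>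
            let j := k - i
            if 0 ≤ j ∧ j < bits then count + pvBit p i.toNat * pvBit q j.toNat else count) 0) := by
    unfold compute_ones_from_pp
    rw [pvFoldl_append_map]; simp
  set pis := (PySem.List.pyRange 0 bits 1).filter (fun i => pvBit p i.toNat != 0) with hpis
  set qis := (PySem.List.pyRange 0 bits 1).filter (fun j => pvBit q j.toNat != 0) with hqis
  set zeros := List.replicate (2 * bits - 1).toNat (0 : Int) with hzeros
  have hB : compute_ones_from_pp_alt p q bits
      = (pis.flatMap (fun i => qis.map (fun j => i + j))).foldl pvBump zeros := by
    rw [← pvFlatten]; rfl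
  have hmem : ∀ n ∈ pis.flatMap (fun i => qis.map (fun j => i + j)),
      0 ≤ n ∧ n < (zeros.length : Int) := by
    intro n hn
    rw [List.mem_flatMap] at hn
    obtain ⟨i, hi, hn⟩ := hn
    rw [List.mem_map] at hn
    obtain ⟨j, hj, rfl⟩ := hn
    have hi' := PySem.List.mem_pyRange_one.mp (List.mem_of_mem_filter hi)
    have hj' := PySem.List.mem_pyRange_one.mp (List.mem_of_mem_filter hj)
    simp only [hzeros, List.length_replicate]
    omega
  obtain ⟨hlen, hget⟩ := pvScatter_spec _ zeros hmem
  rw [hA, hB]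
  apply List.ext_getElem
  · rw [hlen]
    simp [hzeros, PySem.List.length_pyRange_one]
  · intro n h1 h2
    have hz : zeros.getD n 0 = 0 := by
      simp only [hzeros, List.getD, List.getElem?_replicate]
      split <;> rfl
    rw [List.getElem_map, PySem.List.getElem_pyRange_one,
        ← List.getD_eq_getElem _ 0 h2, hget n, hz, zero_add]
    have hkey := pvKey p q bits ((0 : Int) + (n : Int))
    rw [← hpis, ← hqis] at hkey
    simpa using hkey
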